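-- pv_equiv track=rewrite | github.com/zhangshv123/superjump | interview/google/face/intervalDifference.py | getDifferenceInL
-- ===== SOURCE A (Python) =====
-- from collections import defaultdict
--
-- def getDifferenceInL(a, b):
--     mp = defaultdict(lambda: defaultdict(int))
--     a.sort(key = lambda k: k[0])
--     b.sort(key = lambda k: k[0])
--     for s, e in a:
--         mp[s]['a'] += 1
--         mp[e]['a'] -= 1
--     for s, e in b:
--         mp[s]['b'] += 1
--         mp[e]['b'] -= 1
--     start = -1
--     cur = defaultdict(int)
--     res = []
--     for i in sorted(mp.keys()):
--         cur['a'] += mp[i]['a']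
--         cur['b'] += mp[i]['b']
--         if cur['a'] > 0 and cur['b'] == 0 and start == - 1:
--             start = i
--         if (cur['a'] == 0 or cur['b'] > 0) and start != - 1:
--             res.append((start, i))
--             start = -1
--     return res
-- ===== SOURCE B (Python) =====
-- def _upperBound(xs, x):
--     # first index whose element is > x, by binary search on a sorted list
--     lo, hi = 0, len(xs)
--     while lo < hi:
--         mid = (lo + hi) // 2
--         if xs[mid] <= x:
--             lo = mid + 1
--         else:
--             hi = mid
--     return lo
--
--
-- def getDifferenceInL(a, b):
--     a.sort(key=lambda k: k[0])
--     b.sort(key=lambda k: k[0])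
--     sa = sorted(s for s, _ in a)
--     ea = sorted(e for _, e in a)
--     sb = sorted(s for s, _ in b)
--     eb = sorted(e for _, e in b)
--     coords = sorted({x for se in a + b for x in se})
--     res = []
--     start = -1
--     for x in coords:
--         ca = _upperBound(sa, x) - _upperBound(ea, x)
--         cb = _upperBound(sb, x) - _upperBound(eb, x)
--         if ca > 0 and cb == 0 and start == -1:
--             start = x
--         if (ca == 0 or cb > 0) and start != -1:
--             res.append((start, x))
--             start = -1
--     return res
-- ===== Notes on version B (the rewrite author's own statement) =====
-- stated objective: alternative
-- what changed: Replaces the defaultdict-of-defaultdict delta map and cumulative dict sweep by four sorted endpoint lists queried with a hand-written binary search at each distinct coordinate, so no dict is built or threaded at all.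
import Mathlib
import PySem

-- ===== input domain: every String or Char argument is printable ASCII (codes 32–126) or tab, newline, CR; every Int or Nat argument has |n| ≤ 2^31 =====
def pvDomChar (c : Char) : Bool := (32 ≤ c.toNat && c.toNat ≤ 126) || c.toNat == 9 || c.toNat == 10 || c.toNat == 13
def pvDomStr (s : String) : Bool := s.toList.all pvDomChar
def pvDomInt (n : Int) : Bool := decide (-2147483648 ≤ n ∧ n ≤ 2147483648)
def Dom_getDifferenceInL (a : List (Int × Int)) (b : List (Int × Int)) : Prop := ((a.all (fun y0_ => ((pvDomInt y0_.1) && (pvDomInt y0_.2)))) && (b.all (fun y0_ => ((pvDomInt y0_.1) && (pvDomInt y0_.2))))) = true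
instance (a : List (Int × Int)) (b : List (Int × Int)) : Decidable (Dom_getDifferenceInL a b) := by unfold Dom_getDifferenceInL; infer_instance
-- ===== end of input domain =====

-- B replaces A's defaultdict delta-sweep by four sorted endpoint lists queried with a
-- hand-written binary search at each distinct coordinate (alternative decomposition).
-- Both versions sort their arguments in place in Python (the same two key-sorts), so the
-- observable mutation is identical; the equivalence proved here is about the return value.

-- ===== PORT A =====
-- mp[s][c] += 1 ; mp[e][c] -= 1  (mp a defaultdict of defaultdict(int))
def pvBump (c : String) (mp : PySem.Dict Int (PySem.Dict String Int)) (se : Int × Int) :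
    PySem.Dict Int (PySem.Dict String Int) :=
  let mp1 := mp.insert se.1 ((mp.getD se.1 PySem.Dict.empty).modify c 0 (· + 1))
  mp1.insert se.2 ((mp1.getD se.2 PySem.Dict.empty).modify c 0 (· + (-1)))

-- the body of A's final loop: cur['a'] += dA i ; cur['b'] += dB i ; the two ifs
def pvScanA (dA dB : Int → Int) (st : PySem.Dict String Int × Int × List (Int × Int)) (i : Int) :
    PySem.Dict String Int × Int × List (Int × Int) :=
  let cur := (st.1.modify "a" 0 (· + dA i)).modify "b" 0 (· + dB i)
  let start := if 0 < cur.getD "a" 0 ∧ cur.getD "b" 0 = 0 ∧ st.2.1 = -1 then i else st.2.1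
  if (cur.getD "a" 0 = 0 ∨ 0 < cur.getD "b" 0) ∧ start ≠ -1 then (cur, -1, st.2.2 ++ [(start, i)])
  else (cur, start, st.2.2)

def getDifferenceInL (a : List (Int × Int)) (b : List (Int × Int)) : List (Int × Int) :=
  let a := PySem.List.sorted a (fun k => k.1)
  let b := PySem.List.sorted b (fun k => k.1)
  let mp : PySem.Dict Int (PySem.Dict String Int) := PySem.Dict.empty
  let mp := a.foldl (pvBump "a") mp
  let mp := b.foldl (pvBump "b") mp
  let st := (PySem.List.sorted mp.keys (fun x => x)).foldl
    (pvScanA (fun i => (mp.getD i PySem.Dict.empty).getD "a" 0)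
             (fun i => (mp.getD i PySem.Dict.empty).getD "b" 0))
    (PySem.Dict.empty, -1, [])
  st.2.2

-- ===== PORT B =====
-- while lo < hi: mid = (lo+hi)//2; if xs[mid] <= x: lo = mid+1 else: hi = mid
def pvUpperBoundGo (xs : List Int) (x lo hi : Int) : Int :=
  if h : lo < hi then
    let mid := PySem.Int.floordiv (lo + hi) 2
    match PySem.List.pyGet? xs mid with
    | some v => if v ≤ x then pvUpperBoundGo xs x (mid + 1) hi else pvUpperBoundGo xs x lo mid
    | none => lo   -- xs[mid] would be an IndexError; unreachable, since 0 ≤ lo ≤ mid < hi ≤ len(xs) throughout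
  else lo
termination_by (hi - lo).toNat
decreasing_by
  all_goals
  · have h2 := PySem.Int.floordiv_two_mid_bounds (le_of_lt h)
    have : PySem.Int.floordiv (lo + hi) 2 < hi := by
      have := PySem.Int.floordiv_eq_ediv_of_pos (a := lo + hi) (b := 2) (by omega)
      omega
    omega

def pvUpperBound (xs : List Int) (x : Int) : Int := pvUpperBoundGo xs x 0 (xs.length : Int)

-- the body of B's loop over the distinct coordinates
def pvScanB (cA cB : Int → Int) (st : Int × List (Int × Int)) (x : Int) : Int × List (Int × Int) :=
  let ca := cA x
  let cb := cB x
  let start := if 0 < ca ∧ cb = 0 ∧ st.1 = -1 then x else st.1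
  if (ca = 0 ∨ 0 < cb) ∧ start ≠ -1 then (-1, st.2 ++ [(start, x)])
  else (start, st.2)

def getDifferenceInL_alt (a : List (Int × Int)) (b : List (Int × Int)) : List (Int × Int) :=
  let a := PySem.List.sorted a (fun k => k.1)
  let b := PySem.List.sorted b (fun k => k.1)
  let sa := PySem.List.sorted (a.map (fun p => p.1)) (fun x => x)
  let ea := PySem.List.sorted (a.map (fun p => p.2)) (fun x => x)
  let sb := PySem.List.sorted (b.map (fun p => p.1)) (fun x => x)
  let eb := PySem.List.sorted (b.map (fun p => p.2)) (fun x => x)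
  let coords := PySem.List.sorted
    (PySem.Set.ofList ((a ++ b).flatMap (fun se => [se.1, se.2]))) (fun x => x)
  let st := coords.foldl
    (pvScanB (fun x => pvUpperBound sa x - pvUpperBound ea x)
             (fun x => pvUpperBound sb x - pvUpperBound eb x))
    (-1, [])
  st.2

-- ===== PRECONDITION & SPEC =====
def Spec_getDifferenceInL (a : List (Int × Int)) (b : List (Int × Int)) (out : List (Int × Int)) : Prop := out = getDifferenceInL_alt a b
instance (a : List (Int × Int)) (b : List (Int × Int)) (out : List (Int × Int)) : Decidable (Spec_getDifferenceInL a b out) := by unfold Spec_getDifferenceInL; infer_instance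

-- ===== CLAIM (what is proved, stated in full; the proofs are below) =====
def Claim_equal_getDifferenceInL : Prop := ∀ (a : List (Int × Int)) (b : List (Int × Int)), Dom_getDifferenceInL a b → Spec_getDifferenceInL a b (getDifferenceInL a b)

-- ===== LEMMAS AND PROOFS =====

set_option maxRecDepth 4000

-- number of elements ≤ x, as an Int
def pvCntLe (xs : List Int) (x : Int) : Int := (xs.countP (fun v => decide (v ≤ x)) : Int)

theorem pv_le_iff_lt_countP (xs : List Int) (hs : xs.Pairwise (· ≤ ·)) (x : Int) :
    ∀ (i : Nat) (h : i < xs.length), (xs[i] ≤ x ↔ i < xs.countP (fun v => decide (v ≤ x))) := by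
  induction xs with
  | nil => intro i h; simp at h
  | cons y t ih =>
    rcases List.pairwise_cons.mp hs with ⟨hy, ht⟩
    intro i h
    cases i with
    | zero =>
      simp only [List.getElem_cons_zero]
      constructor
      · intro hyx; simp [List.countP_cons, hyx]
      · intro hc
        by_contra hyx
        have h0 : t.countP (fun v => decide (v ≤ x)) = 0 :=
          List.countP_eq_zero.mpr (by
            intro v hv
            simp only [decide_eq_true_eq]
            exact fun hvx => hyx (le_trans (hy v hv) hvx) |>.elim)
        simp [hyx, h0] at hc
    | succ j =>
      simp only [List.getElem_cons_succ]
      have hj : j < t.length := by simpa using h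
      rw [ih ht j hj]
      by_cases hyx : y ≤ x
      · simp [hyx]
      · have h0 : t.countP (fun v => decide (v ≤ x)) = 0 :=
          List.countP_eq_zero.mpr (by
            intro v hv
            simp only [decide_eq_true_eq]
            exact fun hvx => hyx (le_trans (hy v hv) hvx) |>.elim)
        simp [hyx, h0]

-- the binary search computes countP (≤ x) on a sorted list
theorem pvUpperBoundGo_eq (xs : List Int) (x : Int) (hs : xs.Pairwise (· ≤ ·)) :
    ∀ (n : Nat) (lo hi : Int), (hi - lo).toNat ≤ n → 0 ≤ lo → hi ≤ (xs.length : Int) →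
      lo ≤ pvCntLe xs x → pvCntLe xs x ≤ hi →
      pvUpperBoundGo xs x lo hi = pvCntLe xs x := by
  intro n
  induction n with
  | zero =>
    intro lo hi hn h0 hlen hlo hhi
    have : ¬ lo < hi := by omega
    rw [pvUpperBoundGo, dif_neg this]
    omega
  | succ m ih =>
    intro lo hi hn h0 hlen hlo hhi
    rw [pvUpperBoundGo]
    by_cases h : lo < hi
    · rw [dif_pos h]
      have hmid := PySem.Int.floordiv_two_mid_bounds (le_of_lt h)
      have hmidlt : PySem.Int.floordiv (lo + hi) 2 < hi := by
        have := PySem.Int.floordiv_eq_ediv_of_pos (a := lo + hi) (b := 2) (by omega)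
        omega
      set mid := PySem.Int.floordiv (lo + hi) 2 with hmiddef
      have hmn : mid.toNat < xs.length := by omega
      have hget1 : PySem.List.pyGet? xs mid = xs[mid.toNat]? := by
        conv_lhs => rw [show mid = ((mid.toNat : Nat) : Int) by omega]
        exact PySem.List.pyGet?_natCast ..
      have hget : PySem.List.pyGet? xs mid = some xs[mid.toNat] := by
        rw [hget1, List.getElem?_eq_getElem hmn]
      simp only [hget]
      have hchar := pv_le_iff_lt_countP xs hs x mid.toNat hmn
      by_cases hv : xs[mid.toNat] ≤ x
      · rw [if_pos hv]
        have : (mid.toNat : Int) < pvCntLe xs x := by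
          have := hchar.mp hv
          unfold pvCntLe; exact_mod_cast this
        exact ih (mid + 1) hi (by omega) (by omega) hlen (by omega) hhi
      · rw [if_neg hv]
        have : pvCntLe xs x ≤ (mid.toNat : Int) := by
          have := hchar.not.mp hv
          unfold pvCntLe; omega
        exact ih lo mid (by omega) h0 (by omega) hlo (by omega)
    · rw [dif_neg h]; omega

theorem pvUpperBound_eq (xs : List Int) (x : Int) (hs : xs.Pairwise (· ≤ ·)) :
    pvUpperBound xs x = pvCntLe xs x := by
  have hle : pvCntLe xs x ≤ (xs.length : Int) := by
    unfold pvCntLe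
    exact_mod_cast List.countP_le_length ..
  have h0 : 0 ≤ pvCntLe xs x := by unfold pvCntLe; positivity
  exact pvUpperBoundGo_eq xs x hs xs.length 0 xs.length (by omega) le_rfl le_rfl h0 hle

-- B's per-coordinate counter over a sorted copy of the f-values of l
theorem pvUpperBound_sorted_map (l : List (Int × Int)) (f : Int × Int → Int) (x : Int) :
    pvUpperBound (PySem.List.sorted (l.map f) (fun x => x)) x
      = (l.countP (fun p => decide (f p ≤ x)) : Int) := by
  rw [pvUpperBound_eq _ _ (PySem.List.sorted_pairwise _ _)]
  unfold pvCntLe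
  congr 1
  rw [(PySem.List.sorted_perm (l.map f) (fun x => x) false).countP_eq, List.countP_map]
  rfl

-- one pvBump step, seen through getD
theorem pv_getD_pvBump (c : String) (mp : PySem.Dict Int (PySem.Dict String Int))
    (se : Int × Int) (k : Int) (c' : String) :
    ((pvBump c mp se).getD k PySem.Dict.empty).getD c' 0 =
      (mp.getD k PySem.Dict.empty).getD c' 0 +
        (if c' = c then ((if se.1 = k then (1:Int) else 0) - (if se.2 = k then 1 else 0)) else 0) := by
  obtain ⟨s, e⟩ := se
  simp only [pvBump, PySem.Dict.getD_insert, PySem.Dict.getD_modify,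
    apply_ite (fun d : PySem.Dict String Int => PySem.Dict.getD d c' 0),
    apply_ite (fun d : PySem.Dict String Int => PySem.Dict.getD d c 0)]
  split_ifs <;> subst_vars <;> omega

-- the inner-dict value accumulated by a pvBump fold
theorem pv_getD_foldl_pvBump (c : String) (l : List (Int × Int))
    (mp : PySem.Dict Int (PySem.Dict String Int)) (k : Int) (c' : String) :
    (((l.foldl (pvBump c) mp).getD k PySem.Dict.empty).getD c' 0) =
      ((mp.getD k PySem.Dict.empty).getD c' 0) +
        (if c' = c then ((l.countP (fun p => decide (p.1 = k)) : Int)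
                          - (l.countP (fun p => decide (p.2 = k)) : Int)) else 0) := by
  induction l generalizing mp with
  | nil => simp
  | cons se t ih =>
    rw [List.foldl_cons, ih (pvBump c mp se), pv_getD_pvBump]
    by_cases hc : c' = c <;> by_cases h1 : se.1 = k <;> by_cases h2 : se.2 = k <;>
      simp [hc, h1, h2] <;> ring

theorem pv_mem_keys_pvBump (c : String) (mp : PySem.Dict Int (PySem.Dict String Int))
    (se : Int × Int) (k : Int) :
    k ∈ (pvBump c mp se).keys ↔ k = se.1 ∨ k = se.2 ∨ k ∈ mp.keys := by
  simp [pvBump, PySem.Dict.mem_keys_insert]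
  tauto

theorem pv_mem_keys_foldl_pvBump (c : String) (l : List (Int × Int))
    (mp : PySem.Dict Int (PySem.Dict String Int)) (k : Int) :
    (k ∈ (l.foldl (pvBump c) mp).keys ↔ k ∈ mp.keys ∨ k ∈ l.flatMap (fun se => [se.1, se.2])) := by
  induction l generalizing mp with
  | nil => simp
  | cons se t ih =>
    rw [List.foldl_cons, ih (pvBump c mp se)]
    simp [pv_mem_keys_pvBump]
    aesop

theorem pv_nodup_keys_foldl_pvBump (c : String) (l : List (Int × Int))
    (mp : PySem.Dict Int (PySem.Dict String Int)) (h : mp.keys.Nodup) :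
    (l.foldl (pvBump c) mp).keys.Nodup := by
  induction l generalizing mp with
  | nil => exact h
  | cons se t ih =>
    rw [List.foldl_cons]
    exact ih _ (PySem.Dict.nodup_keys_insert _ _ _ (PySem.Dict.nodup_keys_insert _ _ _ h))

theorem pv_sum_map_add (l : List Int) (f g : Int → Int) :
    (l.map (fun k => f k + g k)).sum = (l.map f).sum + (l.map g).sum := by
  induction l with
  | nil => simp
  | cons h t ih => simp [ih]; ring

theorem pv_sum_map_sub (l : List Int) (f g : Int → Int) :
    (l.map (fun k => f k - g k)).sum = (l.map f).sum - (l.map g).sum := by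
  induction l with
  | nil => simp
  | cons h t ih => simp [ih]; ring

-- a single indicator summed over a nodup list
theorem pv_sum_single (ks : List Int) (hnd : ks.Nodup) (v : Int) (hv : v ∈ ks) (x : Int) :
    (ks.map (fun k => if k ≤ x ∧ v = k then (1 : Int) else 0)).sum = if v ≤ x then 1 else 0 := by
  induction ks with
  | nil => simp at hv
  | cons h t ih =>
    rcases List.nodup_cons.mp hnd with ⟨hh, ht⟩
    rcases List.mem_cons.mp hv with rfl | hv'
    · have hz : ∀ k ∈ t, (if k ≤ x ∧ v = k then (1 : Int) else 0) = 0 := by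
        intro k hk
        have : v ≠ k := by rintro rfl; exact hh hk
        simp [this]
      simp only [List.map_cons, List.sum_cons]
      rw [List.sum_eq_zero (by intro y hy; rcases List.mem_map.mp hy with ⟨k, hk, rfl⟩; exact hz k hk)]
      by_cases hx : v ≤ x <;> simp [hx]
    · have hvh : v ≠ h := by rintro rfl; exact hh hv'
      simp only [List.map_cons, List.sum_cons]
      rw [ih ht hv']
      simp [hvh]

-- summing per-key counts over the keys ≤ x gives the count of values ≤ x
theorem pv_sum_count (ks : List Int) (hnd : ks.Nodup) (l : List Int)
    (hsub : ∀ v ∈ l, v ∈ ks) (x : Int) :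
    (ks.map (fun k => if k ≤ x then (l.countP (fun v => decide (v = k)) : Int) else 0)).sum
      = (l.countP (fun v => decide (v ≤ x)) : Int) := by
  induction l with
  | nil => simp [List.sum_eq_zero]
  | cons v t ih =>
    have hv : v ∈ ks := hsub v (List.mem_cons_self ..)
    have hsub' : ∀ w ∈ t, w ∈ ks := fun w hw => hsub w (List.mem_cons_of_mem _ hw)
    have hstep : ∀ k : Int,
        (if k ≤ x then ((v :: t).countP (fun w => decide (w = k)) : Int) else 0)
        = (if k ≤ x then (t.countP (fun w => decide (w = k)) : Int) else 0)
          + (if k ≤ x ∧ v = k then 1 else 0) := by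
      intro k
      by_cases hk : k ≤ x <;> by_cases hvk : v = k <;>
        simp [hk, hvk]
    calc (ks.map fun k => if k ≤ x then ((v :: t).countP (fun w => decide (w = k)) : Int) else 0).sum
        = (ks.map fun k => (if k ≤ x then (t.countP (fun w => decide (w = k)) : Int) else 0)
            + (if k ≤ x ∧ v = k then 1 else 0)).sum := by
          congr 1; exact List.map_congr_left (fun k _ => hstep k)
      _ = (ks.map fun k => if k ≤ x then (t.countP (fun w => decide (w = k)) : Int) else 0).sum
            + (ks.map fun k => if k ≤ x ∧ v = k then (1:Int) else 0).sum := pv_sum_map_add ..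
      _ = (t.countP (fun w => decide (w ≤ x)) : Int) + (if v ≤ x then 1 else 0) := by
          rw [ih hsub', pv_sum_single ks hnd v hv x]
      _ = ((v :: t).countP (fun w => decide (w ≤ x)) : Int) := by
          by_cases hvx : v ≤ x <;> simp [hvx]

-- a prefix sum in a strictly sorted list equals the filtered full sum
theorem pv_sum_prefix (g : Int → Int) (p rest : List Int) (x : Int)
    (hp : ∀ k ∈ p, k < x) (hr : ∀ k ∈ rest, x < k) :
    ((p ++ [x]).map g).sum = ((p ++ x :: rest).map (fun k => if k ≤ x then g k else 0)).sum := by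
  have h1 : p.map (fun k => if k ≤ x then g k else 0) = p.map g :=
    List.map_congr_left (fun k hk => by simp [le_of_lt (hp k hk)])
  have h2 : (rest.map (fun k => if k ≤ x then g k else 0)).sum = 0 :=
    List.sum_eq_zero (by
      intro y hy; rcases List.mem_map.mp hy with ⟨k, hk, rfl⟩
      simp [not_le.mpr (hr k hk)])
  simp [List.map_append, List.sum_append, h1, h2]

-- the delta-prefix-sum of A equals the direct count of B, at a split of the coordinate list
theorem pv_prefix_delta (l' : List (Int × Int)) (coords : List Int)
    (hnd : coords.Nodup) (hlt : coords.Pairwise (· < ·))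
    (hsub1 : ∀ q ∈ l', q.1 ∈ coords) (hsub2 : ∀ q ∈ l', q.2 ∈ coords)
    (pre post : List Int) (x : Int) (hsp : coords = pre ++ x :: post) :
    (pre.map (fun k => (l'.countP (fun q => decide (q.1 = k)) : Int)
                        - (l'.countP (fun q => decide (q.2 = k)) : Int))).sum
      + ((l'.countP (fun q => decide (q.1 = x)) : Int) - (l'.countP (fun q => decide (q.2 = x)) : Int))
    = (l'.countP (fun q => decide (q.1 ≤ x)) : Int) - (l'.countP (fun q => decide (q.2 ≤ x)) : Int) := by
  rw [hsp] at hlt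
  have hpairs := List.pairwise_append.mp hlt
  have hp : ∀ k ∈ pre, k < x := fun k hk => hpairs.2.2 k hk x (List.mem_cons_self ..)
  have hr : ∀ k ∈ post, x < k := fun k hk => (List.pairwise_cons.mp hpairs.2.1).1 k hk
  have key : ∀ (f : Int × Int → Int), (∀ q ∈ l', f q ∈ coords) →
      ((pre ++ [x]).map (fun k => (l'.countP (fun q => decide (f q = k)) : Int))).sum
        = (l'.countP (fun q => decide (f q ≤ x)) : Int) := by
    intro f hsubf
    have hsubf' : ∀ v ∈ l'.map f, v ∈ coords := by
      intro v hv; rcases List.mem_map.mp hv with ⟨q, hq, rfl⟩; exact hsubf q hq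
    have hcnt : ∀ k : Int, (l'.countP (fun q => decide (f q = k)) : Int)
        = ((l'.map f).countP (fun v => decide (v = k)) : Int) := by
      intro k; rw [List.countP_map]; rfl
    have hcnt' : (l'.countP (fun q => decide (f q ≤ x)) : Int)
        = ((l'.map f).countP (fun v => decide (v ≤ x)) : Int) := by
      rw [List.countP_map]; rfl
    calc ((pre ++ [x]).map (fun k => (l'.countP (fun q => decide (f q = k)) : Int))).sum
        = ((pre ++ [x]).map (fun k => ((l'.map f).countP (fun v => decide (v = k)) : Int))).sum := by
          congr 1; exact List.map_congr_left (fun k _ => hcnt k)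
      _ = ((pre ++ x :: post).map (fun k =>
            if k ≤ x then ((l'.map f).countP (fun v => decide (v = k)) : Int) else 0)).sum :=
          pv_sum_prefix _ pre post x hp hr
      _ = ((l'.map f).countP (fun v => decide (v ≤ x)) : Int) := by
          rw [← hsp]; exact pv_sum_count coords hnd (l'.map f) hsubf' x
      _ = (l'.countP (fun q => decide (f q ≤ x)) : Int) := hcnt'.symm
  have k1 := key (fun q => q.1) hsub1
  have k2 := key (fun q => q.2) hsub2
  have hsum : ((pre ++ [x]).map (fun k => (l'.countP (fun q => decide (q.1 = k)) : Int)
      - (l'.countP (fun q => decide (q.2 = k)) : Int))).sum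
      = ((pre ++ [x]).map (fun k => (l'.countP (fun q => decide (q.1 = k)) : Int))).sum
        - ((pre ++ [x]).map (fun k => (l'.countP (fun q => decide (q.2 = k)) : Int))).sum :=
    pv_sum_map_sub ..
  have hexp : ((pre ++ [x]).map (fun k => (l'.countP (fun q => decide (q.1 = k)) : Int)
      - (l'.countP (fun q => decide (q.2 = k)) : Int))).sum
      = (pre.map (fun k => (l'.countP (fun q => decide (q.1 = k)) : Int)
          - (l'.countP (fun q => decide (q.2 = k)) : Int))).sum
        + ((l'.countP (fun q => decide (q.1 = x)) : Int) - (l'.countP (fun q => decide (q.2 = x)) : Int)) := by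
    rw [List.map_append, List.sum_append]; simp
  rw [← hexp, hsum, k1, k2]

-- the two scan loops agree step for step
theorem pv_scan_eq (dA dB cA cB : Int → Int) :
    ∀ (rest p : List Int) (cur : PySem.Dict String Int) (s : Int) (r : List (Int × Int)),
      (∀ pre x post, p ++ rest = pre ++ x :: post →
        ((pre.map dA).sum + dA x = cA x ∧ (pre.map dB).sum + dB x = cB x)) →
      cur.getD "a" 0 = (p.map dA).sum →
      cur.getD "b" 0 = (p.map dB).sum →
      (rest.foldl (pvScanA dA dB) (cur, s, r)).2 = rest.foldl (pvScanB cA cB) (s, r) := by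
  intro rest
  induction rest with
  | nil => intro p cur s r _ _ _; rfl
  | cons x t ih =>
    intro p cur s r hsplit hca hcb
    obtain ⟨hA, hB⟩ := hsplit p x t rfl
    simp only [List.foldl_cons]
    have ha' : ((cur.modify "a" 0 (· + dA x)).modify "b" 0 (· + dB x)).getD "a" 0 = cA x := by
      rw [PySem.Dict.getD_modify, if_neg (by decide), PySem.Dict.getD_modify, if_pos rfl, hca]
      omega
    have hb' : ((cur.modify "a" 0 (· + dA x)).modify "b" 0 (· + dB x)).getD "b" 0 = cB x := by
      rw [PySem.Dict.getD_modify, if_pos rfl, PySem.Dict.getD_modify, if_neg (by decide), hcb]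
      omega
    have hsplit' : ∀ pre y post, (p ++ [x]) ++ t = pre ++ y :: post →
        ((pre.map dA).sum + dA y = cA y ∧ (pre.map dB).sum + dB y = cB y) := by
      intro pre y post hpre
      exact hsplit pre y post (by rw [← hpre]; simp)
    have hmapa : ((p ++ [x]).map dA).sum = cA x := by
      rw [List.map_append, List.sum_append]; simpa using hA
    have hmapb : ((p ++ [x]).map dB).sum = cB x := by
      rw [List.map_append, List.sum_append]; simpa using hB
    show (List.foldl (pvScanA dA dB) (pvScanA dA dB (cur, s, r) x) t).2
        = List.foldl (pvScanB cA cB) (pvScanB cA cB (s, r) x) t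
    rw [show pvScanA dA dB (cur, s, r) x =
        (let cur' := (cur.modify "a" 0 (· + dA x)).modify "b" 0 (· + dB x)
         let start := if 0 < cA x ∧ cB x = 0 ∧ s = -1 then x else s
         if (cA x = 0 ∨ 0 < cB x) ∧ start ≠ -1 then (cur', -1, r ++ [(start, x)])
         else (cur', start, r)) by
      simp only [pvScanA, ha', hb']]
    rw [show pvScanB cA cB (s, r) x =
        (let start := if 0 < cA x ∧ cB x = 0 ∧ s = -1 then x else s
         if (cA x = 0 ∨ 0 < cB x) ∧ start ≠ -1 then ((-1 : Int), r ++ [(start, x)])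
         else (start, r)) by
      simp only [pvScanB]]
    simp only
    by_cases hcond : (cA x = 0 ∨ 0 < cB x) ∧ (if 0 < cA x ∧ cB x = 0 ∧ s = -1 then x else s) ≠ -1
    · rw [if_pos hcond, if_pos hcond]
      exact ih (p ++ [x]) _ _ _ hsplit' (by rw [ha', hmapa]) (by rw [hb', hmapb])
    · rw [if_neg hcond, if_neg hcond]
      exact ih (p ++ [x]) _ _ _ hsplit' (by rw [ha', hmapa]) (by rw [hb', hmapb])

-- ===== VERDICT (by name: the statement is the Claim_ definition above) =====
theorem getDifferenceInL_spec : Claim_equal_getDifferenceInL := by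
  intro a b _hdom
  unfold Spec_getDifferenceInL getDifferenceInL getDifferenceInL_alt
  simp only
  set a' := PySem.List.sorted a (fun k => k.1) with ha'def
  set b' := PySem.List.sorted b (fun k => k.1) with hb'def
  set mp2 := b'.foldl (pvBump "b") (a'.foldl (pvBump "a") PySem.Dict.empty) with hmp2
  set flat := (a' ++ b').flatMap (fun se => [se.1, se.2]) with hflat
  set coords := PySem.List.sorted (PySem.Set.ofList flat) (fun x => x) with hcoords
  -- the two coordinate lists coincide
  have hmem : ∀ k : Int, k ∈ mp2.keys ↔ k ∈ flat := by
    intro k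
    rw [hmp2, pv_mem_keys_foldl_pvBump, pv_mem_keys_foldl_pvBump, hflat]
    simp [PySem.Dict.keys_empty, List.flatMap_append]
  have hknd : mp2.keys.Nodup :=
    pv_nodup_keys_foldl_pvBump _ _ _ (pv_nodup_keys_foldl_pvBump _ _ _ PySem.Dict.nodup_keys_empty)
  have hcoordslt : coords.Pairwise (· < ·) := PySem.List.sorted_ofList_pairwise_lt flat
  have hcoordsnd : coords.Nodup := hcoordslt.imp (fun h => ne_of_lt h)
  have hksnd : (PySem.List.sorted mp2.keys (fun x => x)).Nodup :=
    ((PySem.List.sorted_perm mp2.keys (fun x => x) false).nodup_iff).mpr hknd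
  have hkeq : PySem.List.sorted mp2.keys (fun x => x) = coords := by
    apply List.eq_of_perm_of_sorted (le := fun u v : Int => u ≤ v)
      (fun u v _ _ h1 h2 => le_antisymm h1 h2)
    · exact PySem.List.sorted_pairwise mp2.keys (fun x => x)
    · exact (PySem.List.sorted_pairwise (PySem.Set.ofList flat) (fun x => x))
    · refine (List.perm_ext_iff_of_nodup hksnd hcoordsnd).mpr ?_
      intro k
      rw [PySem.List.mem_sorted, hcoords, PySem.List.mem_sorted, PySem.Set.mem_ofList]
      exact hmem k
  rw [hkeq]
  -- the per-coordinate values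
  have hdA : ∀ k : Int, (mp2.getD k PySem.Dict.empty).getD "a" 0
      = (a'.countP (fun q => decide (q.1 = k)) : Int) - (a'.countP (fun q => decide (q.2 = k)) : Int) := by
    intro k
    rw [hmp2, pv_getD_foldl_pvBump, pv_getD_foldl_pvBump]
    simp [PySem.Dict.getD_empty]
  have hdB : ∀ k : Int, (mp2.getD k PySem.Dict.empty).getD "b" 0
      = (b'.countP (fun q => decide (q.1 = k)) : Int) - (b'.countP (fun q => decide (q.2 = k)) : Int) := by
    intro k
    rw [hmp2, pv_getD_foldl_pvBump, pv_getD_foldl_pvBump]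
    simp [PySem.Dict.getD_empty]
  have hcA : ∀ x : Int, pvUpperBound (PySem.List.sorted (a'.map (fun p => p.1)) (fun x => x)) x
      - pvUpperBound (PySem.List.sorted (a'.map (fun p => p.2)) (fun x => x)) x
      = (a'.countP (fun q => decide (q.1 ≤ x)) : Int) - (a'.countP (fun q => decide (q.2 ≤ x)) : Int) := by
    intro x
    rw [pvUpperBound_sorted_map, pvUpperBound_sorted_map]
  have hcB : ∀ x : Int, pvUpperBound (PySem.List.sorted (b'.map (fun p => p.1)) (fun x => x)) x
      - pvUpperBound (PySem.List.sorted (b'.map (fun p => p.2)) (fun x => x)) x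
      = (b'.countP (fun q => decide (q.1 ≤ x)) : Int) - (b'.countP (fun q => decide (q.2 ≤ x)) : Int) := by
    intro x
    rw [pvUpperBound_sorted_map, pvUpperBound_sorted_map]
  -- the split hypothesis of the scan lemma
  have hsuba1 : ∀ q ∈ a', q.1 ∈ coords := by
    intro q hq
    rw [hcoords, PySem.List.mem_sorted, PySem.Set.mem_ofList, hflat]
    exact List.mem_flatMap.mpr ⟨q, List.mem_append_left _ hq, by simp⟩
  have hsuba2 : ∀ q ∈ a', q.2 ∈ coords := by
    intro q hq
    rw [hcoords, PySem.List.mem_sorted, PySem.Set.mem_ofList, hflat]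
    exact List.mem_flatMap.mpr ⟨q, List.mem_append_left _ hq, by simp⟩
  have hsubb1 : ∀ q ∈ b', q.1 ∈ coords := by
    intro q hq
    rw [hcoords, PySem.List.mem_sorted, PySem.Set.mem_ofList, hflat]
    exact List.mem_flatMap.mpr ⟨q, List.mem_append_right _ hq, by simp⟩
  have hsubb2 : ∀ q ∈ b', q.2 ∈ coords := by
    intro q hq
    rw [hcoords, PySem.List.mem_sorted, PySem.Set.mem_ofList, hflat]
    exact List.mem_flatMap.mpr ⟨q, List.mem_append_right _ hq, by simp⟩
  have hmain := pv_scan_eq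
    (fun i => (mp2.getD i PySem.Dict.empty).getD "a" 0)
    (fun i => (mp2.getD i PySem.Dict.empty).getD "b" 0)
    (fun x => pvUpperBound (PySem.List.sorted (a'.map (fun p => p.1)) (fun x => x)) x
      - pvUpperBound (PySem.List.sorted (a'.map (fun p => p.2)) (fun x => x)) x)
    (fun x => pvUpperBound (PySem.List.sorted (b'.map (fun p => p.1)) (fun x => x)) x
      - pvUpperBound (PySem.List.sorted (b'.map (fun p => p.2)) (fun x => x)) x)
    coords [] PySem.Dict.empty (-1) []
    (by
      intro pre x post hpre
      simp only [List.nil_append] at hpre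
      constructor
      · simp only [hdA, hcA x]
        exact pv_prefix_delta a' coords hcoordsnd hcoordslt hsuba1 hsuba2 pre post x hpre
      · simp only [hdB, hcB x]
        exact pv_prefix_delta b' coords hcoordsnd hcoordslt hsubb1 hsubb2 pre post x hpre)
    (by simp [PySem.Dict.getD_empty])
    (by simp [PySem.Dict.getD_empty])
  exact congrArg Prod.snd hmain
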